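-- pv_equiv track=rewrite | github.com/Justin113D/BlenderSA2Support | common.py | getDistinctwID
-- ===== SOURCE A (Python) =====
-- def getDistinctwID(items: list):
--
-- 	distinct = list()
-- 	IDs = [0] * len(items)
--
-- 	for i, o in enumerate(items):
-- 		found = None
-- 		for j, d in enumerate(distinct):
-- 			if o == d:
-- 				found = j
-- 				break
-- 		if found is None:
-- 			distinct.append(o)
-- 			IDs[i] = len(distinct) - 1
-- 		else:
-- 			IDs[i] = found
--
-- 	return distinct, IDs
-- ===== SOURCE B (Python) =====
-- def getDistinctwID(items: list):
--     # Two staged passes instead of A's single interleaved pass: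
--     # first dedupe, then map every item to its index in the final distinct list.
--     distinct = []
--     for o in items:
--         if o not in distinct:
--             distinct.append(o)
--     IDs = [distinct.index(o) for o in items]
--     return distinct, IDs
-- ===== Notes on version B (the rewrite author's own statement) =====
-- stated objective: simpler
-- what changed: Replaces A's single interleaved pass (which writes ids into a preallocated array at insertion time, via an explicit enumerate scan with a found flag) by two staged passes: dedupe the list first, then compute every id with distinct.index against the finished distinct list.
import Mathlib
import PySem

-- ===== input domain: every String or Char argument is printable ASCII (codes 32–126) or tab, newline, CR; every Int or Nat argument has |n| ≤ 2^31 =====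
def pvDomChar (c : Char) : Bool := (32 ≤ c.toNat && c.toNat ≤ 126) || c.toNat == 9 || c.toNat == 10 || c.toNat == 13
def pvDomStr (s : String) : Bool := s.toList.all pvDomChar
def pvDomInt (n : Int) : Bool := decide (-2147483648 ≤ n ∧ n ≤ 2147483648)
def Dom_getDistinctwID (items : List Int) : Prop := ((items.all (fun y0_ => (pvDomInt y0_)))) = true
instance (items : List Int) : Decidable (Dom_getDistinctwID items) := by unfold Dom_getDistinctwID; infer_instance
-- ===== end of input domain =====

-- B trades A's single interleaved pass (ids written at insertion time into a
-- preallocated array) for two staged passes: dedupe, then index into the final list.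

-- ===== PORT A =====
-- inner 'for j, d in enumerate(distinct): if o == d: found = j; break'
def pvA_find (o : Int) : List (Int × Int) → Option Int
  | [] => none
  | (j, d) :: rest => if o = d then some j else pvA_find o rest

-- outer 'for i, o in enumerate(items)' carrying (distinct, IDs)
def pvA_loop : List (Int × Int) → List Int → List Int → List Int × List Int
  | [], distinct, IDs => (distinct, IDs)
  | (i, o) :: rest, distinct, IDs =>
    match pvA_find o (PySem.List.enumerate distinct) with
    | none =>
      let distinct' := distinct ++ [o]
      pvA_loop rest distinct' (IDs.set i.toNat ((distinct'.length : Int) - 1))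
    | some j => pvA_loop rest distinct (IDs.set i.toNat j)

def getDistinctwID (items : List Int) : List Int × List Int :=
  pvA_loop (PySem.List.enumerate items) [] (List.replicate items.length 0)

-- ===== PORT B =====
-- first pass: 'for o in items: if o not in distinct: distinct.append(o)'
def pvB_dedup : List Int → List Int → List Int
  | distinct, [] => distinct
  | distinct, o :: rest =>
    if o ∈ distinct then pvB_dedup distinct rest else pvB_dedup (distinct ++ [o]) rest

def getDistinctwID_alt (items : List Int) : List Int × List Int :=
  let distinct := pvB_dedup [] items
  -- 'IDs = [distinct.index(o) for o in items]'; index? is never none here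
  (distinct, items.map (fun o => (((PySem.List.index? distinct o).getD 0 : Nat) : Int)))

-- ===== PRECONDITION & SPEC =====
def Spec_getDistinctwID (items : List Int) (out : List Int × List Int) : Prop := out = getDistinctwID_alt items
instance (items : List Int) (out : List Int × List Int) : Decidable (Spec_getDistinctwID items out) := by unfold Spec_getDistinctwID; infer_instance

-- ===== CLAIM (what is proved, stated in full; the proofs are below) =====
def Claim_equal_getDistinctwID : Prop := ∀ (items : List Int), Dom_getDistinctwID items → Spec_getDistinctwID items (getDistinctwID items)

-- ===== LEMMAS AND PROOFS =====

-- A's inner scan is list.index (shifted by the enumerate start)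
theorem pvA_find_eq (o : Int) (d : List Int) :
    ∀ s : Int, pvA_find o (PySem.List.enumerate d s)
      = (PySem.List.index? d o).map (fun k : Nat => s + (k : Int)) := by
  induction d with
  | nil => intro s; simp [PySem.List.enumerate_nil, pvA_find]
  | cons x t ih =>
    intro s
    rw [PySem.List.enumerate_cons]
    by_cases h : o = x
    · subst h
      rw [PySem.List.index?_cons_self]
      simp [pvA_find]
    · rw [PySem.List.index?_cons_of_ne t (Ne.symm h)]
      simp only [pvA_find, if_neg h, ih (s + 1), Option.map_map]
      cases PySem.List.index? t o with
      | none => rfl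
      | some k => simp [Function.comp]; ring

-- dedup only appends to its accumulator
theorem pvB_dedup_extends (rest : List Int) :
    ∀ d : List Int, ∃ e, pvB_dedup d rest = d ++ e := by
  induction rest with
  | nil => intro d; exact ⟨[], by simp [pvB_dedup]⟩
  | cons o t ih =>
    intro d
    by_cases h : o ∈ d
    · obtain ⟨e, he⟩ := ih d
      exact ⟨e, by simp [pvB_dedup, h, he]⟩
    · obtain ⟨e, he⟩ := ih (d ++ [o])
      exact ⟨o :: e, by simp [pvB_dedup, h, he]⟩

theorem set_mid (ids t : List Int) (v : Int) :
    (ids ++ (0 : Int) :: t).set ids.length v = (ids ++ [v]) ++ t := by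
  rw [List.set_append_right _ _ (Nat.le_refl _)]
  simp

-- the id B assigns relative to the FINAL distinct list
def pvB_id (dist : List Int) (o : Int) : Int :=
  (((PySem.List.index? dist o).getD 0 : Nat) : Int)

-- main invariant: A's interleaved loop equals B's two staged passes
theorem loop_eq (rest : List Int) :
    ∀ (d ids : List Int),
      pvA_loop (PySem.List.enumerate rest (ids.length : Int)) d
          (ids ++ List.replicate rest.length (0 : Int))
        = (pvB_dedup d rest, ids ++ rest.map (pvB_id (pvB_dedup d rest))) := by
  induction rest with
  | nil =>
    intro d ids
    simp [PySem.List.enumerate_nil, pvA_loop, pvB_dedup]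
  | cons o t ih =>
    intro d ids
    rw [PySem.List.enumerate_cons, List.length_cons, List.replicate_succ]
    show pvA_loop (((ids.length : Int), o) :: PySem.List.enumerate t ((ids.length : Int) + 1)) d
        (ids ++ (0 : Int) :: List.replicate t.length 0) = _
    simp only [pvA_loop, pvA_find_eq o d 0]
    by_cases h : o ∈ d
    · obtain ⟨k, hk⟩ := Option.isSome_iff_exists.mp
        ((PySem.List.index?_isSome_iff d o).mpr h)
      obtain ⟨e, he⟩ := pvB_dedup_extends t d
      have hid : pvB_id (pvB_dedup d t) o = (k : Int) := by
        unfold pvB_id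
        rw [he, PySem.List.index?_append_of_mem e h, hk]
        rfl
      rw [hk]
      simp only [Option.map_some, zero_add]
      show pvA_loop (PySem.List.enumerate t ((ids.length:Int) + 1)) d
          ((ids ++ (0:Int) :: List.replicate t.length 0).set ((ids.length:Int)).toNat (k:Int)) = _
      rw [show ((ids.length : Int)).toNat = ids.length by simp, set_mid,
        show ((ids.length : Int) + 1) = (((ids ++ [(k : Int)]).length : Int)) by simp,
        ih d (ids ++ [(k : Int)])]
      have hded : pvB_dedup d (o :: t) = pvB_dedup d t := by simp [pvB_dedup, h]
      rw [hded]
      simp [hid]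
    · have hnone : PySem.List.index? d o = none :=
        (PySem.List.index?_eq_none_iff ..).mpr h
      obtain ⟨e, he⟩ := pvB_dedup_extends t (d ++ [o])
      have hid : pvB_id (pvB_dedup (d ++ [o]) t) o = (d.length : Int) := by
        unfold pvB_id
        have hm : o ∈ d ++ [o] := by simp
        rw [he, PySem.List.index?_append_of_mem e hm,
          PySem.List.index?_append_singleton_self d o h]
        rfl
      rw [hnone]
      simp only [Option.map_none]
      show pvA_loop (PySem.List.enumerate t ((ids.length:Int) + 1)) (d ++ [o])
          ((ids ++ (0:Int) :: List.replicate t.length 0).set ((ids.length:Int)).toNat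
            (((d ++ [o]).length : Int) - 1)) = _
      have hv : ((d ++ [o]).length : Int) - 1 = (d.length : Int) := by simp
      rw [hv, show ((ids.length : Int)).toNat = ids.length by simp, set_mid,
        show ((ids.length : Int) + 1) = (((ids ++ [(d.length : Int)]).length : Int)) by simp,
        ih (d ++ [o]) (ids ++ [(d.length : Int)])]
      have hded : pvB_dedup d (o :: t) = pvB_dedup (d ++ [o]) t := by
        simp [pvB_dedup, h]
      rw [hded]
      simp [hid]

-- ===== VERDICT (by name: the statement is the Claim_ definition above) =====
theorem getDistinctwID_spec : Claim_equal_getDistinctwID := by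
  intro items _
  show getDistinctwID items = getDistinctwID_alt items
  have h := loop_eq items [] []
  simpa [getDistinctwID, getDistinctwID_alt, pvB_id,
    PySem.List.enumerate_nil] using h
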